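-- pv_equiv track=rewrite | github.com/jyc0011/backjoon | 프로그래머스/2/118667. 두 큐 합 같게 만들기/두 큐 합 같게 만들기.py | solution
-- ===== SOURCE A (Python) =====
-- from collections import deque
--
-- def solution(queue1, queue2):
--     answer = 0
--     sum_,sumQ1=0,0
--     num=0
--     q1,q2=deque(),deque()
--     for i in queue1:
--         q1.append(i)
--         sum_+=i
--         num+=1
--         sumQ1+=i
--     for j in queue2:
--         q2.append(j)
--         sum_+=j
--         num+=1
--     if sum_%2 == 1:
--         return -1
--     sum_//=2
--     num*=4
--     while sumQ1!=sum_: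
--         if answer >= num:
--             return -1
--         if sumQ1 >sum_:
--             a=q1.popleft()
--             q2.append(a)
--             sumQ1-=a
--         else:
--             a=q2.popleft()
--             q1.append(a)
--             sumQ1+=a
--         answer+=1
--     return answer
-- ===== SOURCE B (Python) =====
-- def solution(queue1, queue2):
--     k = len(queue1)
--     n = k + len(queue2)
--     C = (list(queue1) + list(queue2)) * 5
--     P = [0]
--     for x in C:
--         P.append(P[-1] + x)
--     total = P[n]
--     if total % 2:
--         return -1
--     target = total // 2
--     l = 0
--     for t in range(4 * n):
--         s = P[k + t - l] - P[l]
--         if s == target: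
--             return t
--         if s > target:
--             l += 1
--     return 4 * n if P[k + 4 * n - l] - P[l] == target else -1
-- ===== Notes on version B (the rewrite author's own statement) =====
-- stated objective: alternative
-- what changed: Replaces A's deque simulation (popping/appending elements and a running queue sum each step) by a precomputed prefix-sum table over the 5x-repeated concatenation: a bounded for-loop over the step count keeps only one left pointer and reads each window sum as a difference of two prefix sums, with no container mutation, no running sum and no cyclic modular arithmetic.
-- outside the precondition, e.g. on solution([-2, 1], [1, -2]): A returns 0, B returns 0; on solution([], [-2]): A raises IndexError, B returns -1
import Mathlib
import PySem

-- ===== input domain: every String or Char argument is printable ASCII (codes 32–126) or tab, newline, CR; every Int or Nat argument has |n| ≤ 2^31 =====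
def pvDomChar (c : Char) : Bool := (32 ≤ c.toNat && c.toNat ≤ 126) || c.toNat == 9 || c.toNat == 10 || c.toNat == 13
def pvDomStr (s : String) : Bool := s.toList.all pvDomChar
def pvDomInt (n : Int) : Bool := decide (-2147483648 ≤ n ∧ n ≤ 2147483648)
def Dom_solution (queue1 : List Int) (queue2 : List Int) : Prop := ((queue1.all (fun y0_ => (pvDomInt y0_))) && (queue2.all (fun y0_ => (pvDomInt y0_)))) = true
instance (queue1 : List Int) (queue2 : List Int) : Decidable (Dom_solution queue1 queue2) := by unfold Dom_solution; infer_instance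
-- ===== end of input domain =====

-- B replaces A's deque simulation by a prefix-sum table over the 5x-repeated concatenation and a
-- bounded for-loop over the step count keeping one left pointer; return-value equivalence on Pre_.

-- ===== PORT A =====
-- A's while loop, transliterated: popleft/append on the two deques (Lean lists), cap check first.
-- The [] branches correspond to deque.popleft() raising IndexError; they are unreachable under Pre_.
def solLoopA (q1 q2 : List Int) (sumQ1 target answer num : Int) : Int :=
  if sumQ1 = target then answer
  else if answer ≥ num then -1
  else if sumQ1 > target then
    match q1 with
    | [] => -1  -- IndexError in Python A (excluded by Pre_)
    | a :: t => solLoopA t (q2 ++ [a]) (sumQ1 - a) target (answer + 1) num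
  else
    match q2 with
    | [] => -1  -- IndexError in Python A (excluded by Pre_)
    | a :: t => solLoopA (q1 ++ [a]) t (sumQ1 + a) target (answer + 1) num
termination_by (num - answer).toNat
decreasing_by all_goals omega

def solution (queue1 : List Int) (queue2 : List Int) : Int :=
  -- for i in queue1: q1.append(i); sum_+=i; num+=1; sumQ1+=i
  let st1 : List Int × Int × Int × Int :=
    queue1.foldl (fun st i => (st.1 ++ [i], st.2.1 + i, st.2.2.1 + 1, st.2.2.2 + i)) ([], 0, 0, 0)
  -- for j in queue2: q2.append(j); sum_+=j; num+=1
  let st2 : List Int × Int × Int :=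
    queue2.foldl (fun st j => (st.1 ++ [j], st.2.1 + j, st.2.2 + 1)) ([], st1.2.1, st1.2.2.1)
  if PySem.Int.mod st2.2.1 2 = 1 then -1
  else solLoopA st1.1 st2.1 st1.2.2.2 (PySem.Int.floordiv st2.2.1 2) 0 (st2.2.2 * 4)

-- ===== PORT B =====
-- B's for-loop over the step count t: the window sum is read off the prefix-sum table P as
-- P[k+t-l] - P[l]; early 'return t' is Sum.inl, falling off the loop returns the final l (Sum.inr).
def bFor (P : List Int) (k tgt : Int) : List Int → Int → Int ⊕ Int
  | [], l => Sum.inr l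
  | t :: ts, l =>
    let s := (PySem.List.pyGet? P (k + t - l)).getD 0 - (PySem.List.pyGet? P l).getD 0
    if s = tgt then Sum.inl t
    else if s > tgt then bFor P k tgt ts (l + 1)
    else bFor P k tgt ts l

def solution_alt (queue1 : List Int) (queue2 : List Int) : Int :=
  let k : Int := queue1.length
  let n : Int := k + queue2.length
  let C5 := (queue1 ++ queue2) ++ ((queue1 ++ queue2) ++ ((queue1 ++ queue2) ++ ((queue1 ++ queue2) ++ (queue1 ++ queue2))))
  -- P = [0]; for x in C: P.append(P[-1] + x)
  let P := C5.foldl (fun P x => P ++ [(PySem.List.pyGet? P (-1)).getD 0 + x]) [0]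
  let total := (PySem.List.pyGet? P n).getD 0
  if PySem.Int.mod total 2 ≠ 0 then -1
  else
    let target := PySem.Int.floordiv total 2
    match bFor P k target (PySem.List.pyRange 0 (4 * n) 1) 0 with
    | Sum.inl t => t
    | Sum.inr l =>
      if (PySem.List.pyGet? P (k + 4 * n - l)).getD 0 - (PySem.List.pyGet? P l).getD 0 = target
      then 4 * n else -1

-- ===== PRECONDITION & SPEC =====
-- Pre_ excludes inputs whose total sum is even and negative: only there can A pop an empty
-- deque (IndexError); the exact crashing set is not closed-form, so the whole even-negative
-- region is excluded (on its non-crashing part A and B in fact still agree, see cites).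
def Pre_solution (queue1 : List Int) (queue2 : List Int) : Prop :=
  ¬ (2 ∣ (queue1.sum + queue2.sum)) ∨ 0 ≤ queue1.sum + queue2.sum
instance (queue1 : List Int) (queue2 : List Int) : Decidable (Pre_solution queue1 queue2) := by
  unfold Pre_solution; infer_instance

def pvWitness_solution : List Int × List Int := ([3, 2, 7, 2], [4, 6, 5, 1])

def Spec_solution (queue1 : List Int) (queue2 : List Int) (out : Int) : Prop := out = solution_alt queue1 queue2
instance (queue1 : List Int) (queue2 : List Int) (out : Int) : Decidable (Spec_solution queue1 queue2 out) := by unfold Spec_solution; infer_instance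

-- ===== CLAIM (what is proved, stated in full; the proofs are below) =====
def Claim_equal_solution : Prop := ∀ (queue1 : List Int) (queue2 : List Int), Dom_solution queue1 queue2 → Pre_solution queue1 queue2 → Spec_solution queue1 queue2 (solution queue1 queue2)

-- ===== LEMMAS AND PROOFS =====

-- the cyclic element C[i % len C] (total form)
def cycRead (C : List Int) (i : Int) : Int :=
  (PySem.List.pyGet? C (PySem.Int.mod i C.length)).getD 0

-- the window [l, l+n) of cyclic reads
def winMap (C : List Int) (l : Int) (n : Nat) : List Int :=
  (List.range n).map (fun (j : Nat) => cycRead C (l + (j : Int)))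

theorem cycRead_of_lt (C : List Int) (i : Int) (h0 : 0 ≤ i) (h : i < C.length) :
    cycRead C i = C.getD i.toNat 0 := by
  unfold cycRead
  rw [PySem.Int.mod_eq_emod_of_pos (by omega), Int.emod_eq_of_lt h0 h]
  rw [PySem.List.pyGet?_of_nonneg C h0]
  have hlt : i.toNat < C.length := by omega
  simp [List.getElem?_eq_getElem hlt, List.getD]

theorem cycRead_add_len (C : List Int) (i : Int) :
    cycRead C (i + C.length) = cycRead C i := by
  unfold cycRead
  rcases Nat.eq_zero_or_pos C.length with h | h
  · simp [h]
  · have hpos : (0 : Int) < C.length := by exact_mod_cast h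
    have hmod : (i + (C.length : Int)) % (C.length : Int) = i % C.length := by
      have h1 := Int.add_mul_emod_self_left (a := i) (b := (C.length : Int)) (c := 1)
      rw [mul_one] at h1
      exact h1
    rw [PySem.Int.mod_eq_emod_of_pos hpos, PySem.Int.mod_eq_emod_of_pos hpos, hmod]

theorem winMap_zero (C : List Int) (l : Int) : winMap C l 0 = [] := by simp [winMap]

theorem winMap_cons (C : List Int) (l : Int) (n : Nat) :
    winMap C l (n + 1) = cycRead C l :: winMap C (l + 1) n := by
  unfold winMap
  rw [List.range_succ_eq_map, List.map_cons, List.map_map]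
  simp only [Nat.cast_zero, add_zero]
  congr 1
  apply List.map_congr_left
  intro j _
  simp only [Function.comp_apply]
  push_cast
  ring_nf

theorem winMap_snoc (C : List Int) (l : Int) (n : Nat) :
    winMap C l (n + 1) = winMap C l n ++ [cycRead C (l + n)] := by
  unfold winMap
  rw [List.range_succ]
  simp

theorem winMap_getElem (C : List Int) (l : Int) (n : Nat) (j : Nat)
    (h' : j < (winMap C l n).length) :
    (winMap C l n)[j] = cycRead C (l + j) := by
  simp [winMap]

theorem winMap_length (C : List Int) (l : Int) (n : Nat) : (winMap C l n).length = n := by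
  simp [winMap]

theorem winMap_add (C : List Int) (l : Int) (m j : Nat) :
    winMap C l (m + j) = winMap C l m ++ winMap C (l + m) j := by
  induction j with
  | zero => simp [winMap_zero]
  | succ j ih =>
    have harg : l + ((m + j : Nat) : Int) = (l + (m : Int)) + (j : Int) := by push_cast; ring
    rw [show m + (j + 1) = (m + j) + 1 by omega, winMap_snoc, ih, winMap_snoc, harg,
        List.append_assoc]

-- step and exit equations for A's loop
theorem solLoopA_done (q1 q2 : List Int) (s tg ans num : Int) (h : s = tg) :
    solLoopA q1 q2 s tg ans num = ans := by rw [solLoopA.eq_def]; simp [h]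

theorem solLoopA_cap (q1 q2 : List Int) (s tg ans num : Int) (h : ¬ s = tg) (hc : ans ≥ num) :
    solLoopA q1 q2 s tg ans num = -1 := by rw [solLoopA.eq_def]; simp [h, hc]

theorem solLoopA_pop1 (a : Int) (t q2 : List Int) (s tg ans num : Int)
    (h : ¬ s = tg) (hc : ¬ ans ≥ num) (hg : s > tg) :
    solLoopA (a :: t) q2 s tg ans num = solLoopA t (q2 ++ [a]) (s - a) tg (ans + 1) num := by
  rw [solLoopA.eq_def]; simp [h, hc, hg]

theorem solLoopA_pop2 (q1 : List Int) (a : Int) (t : List Int) (s tg ans num : Int)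
    (h : ¬ s = tg) (hc : ¬ ans ≥ num) (hg : ¬ s > tg) :
    solLoopA q1 (a :: t) s tg ans num = solLoopA (q1 ++ [a]) t (s + a) tg (ans + 1) num := by
  rw [solLoopA.eq_def]; simp [h, hc, hg]

-- B's prefix-building fold is scanl (+)
theorem foldP_scanl (xs : List Int) : ∀ (acc : List Int) (s : Int),
    xs.foldl (fun P x => P ++ [(PySem.List.pyGet? P (-1)).getD 0 + x]) (acc ++ [s])
      = acc ++ List.scanl (· + ·) s xs := by
  induction xs with
  | nil => intro acc s; simp [List.scanl]
  | cons x xs ih =>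
    intro acc s
    simp only [List.foldl_cons, PySem.List.pyGet?_neg_one_append_singleton, Option.getD_some,
      List.append_assoc]
    rw [show acc ++ ([s] ++ [s + x]) = (acc ++ [s]) ++ [s + x] by simp]
    rw [ih (acc ++ [s]) (s + x)]
    simp [List.scanl_cons]

theorem scanl_getElem? (xs : List Int) : ∀ (s : Int) (i : Nat), i ≤ xs.length →
    (List.scanl (· + ·) s xs)[i]? = some (s + (xs.take i).sum) := by
  induction xs with
  | nil =>
    intro s i hi
    obtain rfl : i = 0 := by simpa using hi
    simp [List.scanl_nil]
  | cons x xs ih =>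
    intro s i hi
    cases i with
    | zero => simp [List.scanl_cons]
    | succ i =>
      simp only [List.scanl_cons, List.getElem?_cons_succ]
      rw [ih (s + x) i (by simpa using hi)]
      simp only [List.take_succ_cons, List.sum_cons]
      congr 1
      ring

-- extending a list that reads cyclically from C by one more copy of C in front
theorem cycExt (C D : List Int)
    (hD : ∀ j : Nat, j < D.length → D[j]? = some (cycRead C j)) :
    ∀ j : Nat, j < (C ++ D).length → (C ++ D)[j]? = some (cycRead C j) := by
  intro j hj
  by_cases h : j < C.length
  · rw [List.getElem?_append_left h, List.getElem?_eq_getElem h]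
    rw [cycRead_of_lt C j (by positivity) (by exact_mod_cast h)]
    simp [List.getD, List.getElem?_eq_getElem h]
  · have hj' : j - C.length < D.length := by simp at hj; omega
    rw [List.getElem?_append_right (by omega), hD _ hj']
    have : cycRead C j = cycRead C ((j - C.length : Nat)) := by
      have h2 := cycRead_add_len C ((j - C.length : Nat) : Int)
      rw [show (((j - C.length : Nat) : Int) + C.length) = (j : Int) by omega] at h2
      rw [h2]
    rw [this]

theorem cycBase (C : List Int) : ∀ j : Nat, j < C.length → C[j]? = some (cycRead C j) := by
  intro j hj
  rw [List.getElem?_eq_getElem hj, cycRead_of_lt C j (by positivity) (by exact_mod_cast hj)]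
  simp [List.getD, List.getElem?_eq_getElem hj]

-- on the full concatenation, the window maps recover the original queues
theorem winMap_prefix (queue1 queue2 : List Int) :
    winMap (queue1 ++ queue2) 0 queue1.length = queue1 := by
  apply List.ext_getElem
  · rw [winMap_length]
  · intro j h1 h2
    rw [winMap_getElem _ _ _ _ h1, zero_add]
    rw [cycRead_of_lt _ _ (by exact_mod_cast Nat.zero_le j) (by simp; omega)]
    have : ((j : Int)).toNat = j := by omega
    rw [this]
    rw [List.getD_eq_getElem _ _ (by simp; omega)]
    rw [List.getElem_append_left h2]

theorem winMap_suffix (queue1 queue2 : List Int) :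
    winMap (queue1 ++ queue2) (queue1.length : Int) queue2.length = queue2 := by
  apply List.ext_getElem
  · rw [winMap_length]
  · intro j h1 h2
    rw [winMap_getElem _ _ _ _ h1]
    rw [cycRead_of_lt _ _ (by positivity) (by simp; omega)]
    have ht : (((queue1.length : Int)) + (j : Int)).toNat = queue1.length + j := by omega
    rw [ht, List.getD_eq_getElem _ _ (by simp; omega)]
    rw [List.getElem_append_right (by omega)]
    congr 1
    omega

-- the two loops agree on related states, provided the target is nonnegative
theorem loop_eq (C P : List Int) (k target : Int)
    (hk : 0 ≤ k) (hkn : k ≤ (C.length : Int)) (htgt : 0 ≤ target)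
    (hread : ∀ i : Int, 0 ≤ i → i ≤ 5 * (C.length : Int) →
      (PySem.List.pyGet? P i).getD 0 = (winMap C 0 i.toNat).sum) :
    ∀ (fuel : Nat) (l t : Int) (q1 q2 : List Int),
      fuel = (4 * (C.length : Int) - t).toNat →
      0 ≤ t → t ≤ 4 * (C.length : Int) →
      0 ≤ l → l ≤ k + t - l → k + t - l ≤ l + (C.length : Int) →
      q1 = winMap C l ((k + t - l) - l).toNat →
      q2 = winMap C (k + t - l) ((l + (C.length : Int)) - (k + t - l)).toNat →
      q1.sum + q2.sum = 2 * target →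
      solLoopA q1 q2 q1.sum target t (4 * (C.length : Int)) =
        (match bFor P k target (PySem.List.pyRange t (4 * (C.length : Int)) 1) l with
         | Sum.inl v => v
         | Sum.inr l' =>
            if (PySem.List.pyGet? P (k + 4 * (C.length : Int) - l')).getD 0
                - (PySem.List.pyGet? P l').getD 0 = target
            then 4 * (C.length : Int) else -1) := by
  intro fuel
  induction fuel with
  | zero =>
    intro l t q1 q2 hfuel ht0 htle hl hlr hrN hq1 hq2 htot
    have ht : t = 4 * (C.length : Int) := by omega
    subst ht
    have hsval : (PySem.List.pyGet? P (k + 4 * (C.length : Int) - l)).getD 0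
        - (PySem.List.pyGet? P l).getD 0 = q1.sum := by
      rw [hread (k + 4 * (C.length : Int) - l) (by omega) (by omega),
          hread l (by omega) (by omega), hq1]
      have hsplit := winMap_add C 0 l.toNat ((k + 4 * (C.length : Int) - l) - l).toNat
      rw [show (0 : Int) + (l.toNat : Int) = l by omega] at hsplit
      rw [show l.toNat + ((k + 4 * (C.length : Int) - l) - l).toNat
            = (k + 4 * (C.length : Int) - l).toNat by omega] at hsplit
      rw [hsplit]
      simp
    rw [PySem.List.pyRange_one_eq_nil (by omega)]
    simp only [bFor]
    rw [hsval]
    by_cases hdone : q1.sum = target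
    · rw [solLoopA_done _ _ _ _ _ _ hdone, if_pos hdone]
    · rw [solLoopA_cap _ _ _ _ _ _ hdone (by omega), if_neg hdone]
  | succ fl ih =>
    intro l t q1 q2 hfuel ht0 htle hl hlr hrN hq1 hq2 htot
    have htlt : t < 4 * (C.length : Int) := by omega
    have hsval : (PySem.List.pyGet? P (k + t - l)).getD 0
        - (PySem.List.pyGet? P l).getD 0 = q1.sum := by
      rw [hread (k + t - l) (by omega) (by omega), hread l (by omega) (by omega), hq1]
      have hsplit := winMap_add C 0 l.toNat ((k + t - l) - l).toNat
      rw [show (0 : Int) + (l.toNat : Int) = l by omega] at hsplit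
      rw [show l.toNat + ((k + t - l) - l).toNat = (k + t - l).toNat by omega] at hsplit
      rw [hsplit]
      simp
    rw [PySem.List.pyRange_one_cons htlt]
    simp only [bFor]
    rw [hsval]
    by_cases hdone : q1.sum = target
    · rw [solLoopA_done _ _ _ _ _ _ hdone, if_pos hdone]
    · rw [if_neg hdone]
      have hcap : ¬ t ≥ 4 * (C.length : Int) := by omega
      by_cases hgt : q1.sum > target
      · -- pop from q1: the window is nonempty since its sum exceeds target ≥ 0
        rw [if_pos hgt]
        have hlr' : l < k + t - l := by
          rcases Int.lt_or_le l (k + t - l) with h | h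
          · exact h
          · exfalso
            have he : k + t - l = l := le_antisymm h hlr
            rw [he] at hq1
            simp only [show (l - l).toNat = 0 by omega, winMap_zero] at hq1
            rw [hq1] at hgt
            simp at hgt
            omega
        have hq1c : q1 = cycRead C l :: winMap C (l + 1) ((k + t - l) - (l + 1)).toNat := by
          rw [hq1, show ((k + t - l) - l).toNat = ((k + t - l) - (l + 1)).toNat + 1 by omega,
              winMap_cons]
        have hq2' : q2 ++ [cycRead C l]
            = winMap C (k + t - l) ((l + 1 + (C.length : Int)) - (k + t - l)).toNat := by
          have hcyc : cycRead C l
              = cycRead C ((k + t - l) + (((l + (C.length : Int)) - (k + t - l)).toNat : Int)) := by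
            have he : ((k + t - l) + (((l + (C.length : Int)) - (k + t - l)).toNat : Int))
                = l + C.length := by omega
            rw [he, cycRead_add_len]
          rw [hq2, hcyc, ← winMap_snoc,
              show ((l + 1 + (C.length : Int)) - (k + t - l)).toNat
                = ((l + (C.length : Int)) - (k + t - l)).toNat + 1 by omega]
        have hsum1 : q1.sum - cycRead C l
            = (winMap C (l + 1) ((k + t - l) - (l + 1)).toNat).sum := by
          rw [hq1c]; simp
        have htot' : (winMap C (l + 1) ((k + t - l) - (l + 1)).toNat).sum
            + (winMap C (k + t - l) ((l + 1 + (C.length : Int)) - (k + t - l)).toNat).sum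
            = 2 * target := by
          rw [← hq2']
          have h1 : (q2 ++ [cycRead C l]).sum = q2.sum + cycRead C l := by simp
          have h2 : q1.sum = cycRead C l
              + (winMap C (l + 1) ((k + t - l) - (l + 1)).toNat).sum := by rw [hq1c]; simp
          omega
        have hr1 : k + (t + 1) - (l + 1) = k + t - l := by ring
        have key := ih (l + 1) (t + 1)
          (winMap C (l + 1) ((k + (t + 1) - (l + 1)) - (l + 1)).toNat)
          (winMap C (k + (t + 1) - (l + 1))
            (((l + 1) + (C.length : Int)) - (k + (t + 1) - (l + 1))).toNat)
          (by omega) (by omega) (by omega) (by omega) (by omega) (by omega) rfl rfl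
          (by rw [hr1, show (l + 1) + (C.length : Int) = l + 1 + (C.length : Int) by ring]
              exact htot')
        rw [hr1] at key
        calc solLoopA q1 q2 q1.sum target t (4 * (C.length : Int))
            = solLoopA (winMap C (l + 1) ((k + t - l) - (l + 1)).toNat) (q2 ++ [cycRead C l])
                (q1.sum - cycRead C l) target (t + 1) (4 * (C.length : Int)) := by
              rw [hq1c]
              exact solLoopA_pop1 _ _ _ _ _ _ _ (by rw [← hq1c]; exact hdone) hcap
                (by rw [← hq1c]; exact hgt)
          _ = _ := by rw [hq2', hsum1]; exact key
      · -- pull from q2: q2 is nonempty, else the full-window sum 2*target would be < target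
        rw [if_neg hgt]
        have hrN' : k + t - l < l + (C.length : Int) := by
          rcases Int.lt_or_le (k + t - l) (l + (C.length : Int)) with h | h
          · exact h
          · exfalso
            have he : k + t - l = l + (C.length : Int) := le_antisymm hrN h
            rw [he] at hq2
            simp only [show ((l + (C.length : Int)) - (l + (C.length : Int))).toNat = 0 by omega,
              winMap_zero] at hq2
            rw [hq2] at htot
            simp at htot
            omega
        have hq2c : q2 = cycRead C (k + t - l)
            :: winMap C ((k + t - l) + 1) ((l + (C.length : Int)) - ((k + t - l) + 1)).toNat := by
          rw [hq2, show ((l + (C.length : Int)) - (k + t - l)).toNat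
            = ((l + (C.length : Int)) - ((k + t - l) + 1)).toNat + 1 by omega, winMap_cons]
        have hq1' : q1 ++ [cycRead C (k + t - l)] = winMap C l (((k + t - l) + 1) - l).toNat := by
          have hcyc : cycRead C (k + t - l)
              = cycRead C (l + ((((k + t - l) - l).toNat : Nat) : Int)) := by
            congr 1; omega
          rw [hq1, hcyc, ← winMap_snoc,
              show (((k + t - l) + 1) - l).toNat = ((k + t - l) - l).toNat + 1 by omega]
        have hsA : q1.sum + cycRead C (k + t - l)
            = (winMap C l (((k + t - l) + 1) - l).toNat).sum := by
          rw [← hq1']; simp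
        have htot' : (winMap C l (((k + t - l) + 1) - l).toNat).sum
            + (winMap C ((k + t - l) + 1)
                ((l + (C.length : Int)) - ((k + t - l) + 1)).toNat).sum = 2 * target := by
          rw [← hq1']
          have h1 : (q1 ++ [cycRead C (k + t - l)]).sum = q1.sum + cycRead C (k + t - l) := by simp
          have h2 : q2.sum = cycRead C (k + t - l)
              + (winMap C ((k + t - l) + 1)
                  ((l + (C.length : Int)) - ((k + t - l) + 1)).toNat).sum := by rw [hq2c]; simp
          omega
        have hr1 : k + (t + 1) - l = (k + t - l) + 1 := by ring
        have key := ih l (t + 1)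
          (winMap C l ((k + (t + 1) - l) - l).toNat)
          (winMap C (k + (t + 1) - l) ((l + (C.length : Int)) - (k + (t + 1) - l)).toNat)
          (by omega) (by omega) (by omega) (by omega) (by omega) (by omega) rfl rfl
          (by rw [hr1]; exact htot')
        rw [hr1] at key
        calc solLoopA q1 q2 q1.sum target t (4 * (C.length : Int))
            = solLoopA (q1 ++ [cycRead C (k + t - l)])
                (winMap C ((k + t - l) + 1) ((l + (C.length : Int)) - ((k + t - l) + 1)).toNat)
                (q1.sum + cycRead C (k + t - l)) target (t + 1) (4 * (C.length : Int)) := by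
              rw [hq2c]
              exact solLoopA_pop2 _ _ _ _ _ _ _ hdone hcap hgt
          _ = _ := by rw [hsA]; rw [hq1']; exact key

-- the build-up folds of A compute (the list itself, running sums, count)
theorem foldA1 (queue1 : List Int) :
    queue1.foldl (fun st i => (st.1 ++ [i], st.2.1 + i, st.2.2.1 + 1, st.2.2.2 + i))
      (([], 0, 0, 0) : List Int × Int × Int × Int)
      = (queue1, queue1.sum, (queue1.length : Int), queue1.sum) := by
  have gen : ∀ (xs : List Int) (acc : List Int) (s n t : Int),
      xs.foldl (fun st i => (st.1 ++ [i], st.2.1 + i, st.2.2.1 + 1, st.2.2.2 + i)) (acc, s, n, t)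
        = (acc ++ xs, s + xs.sum, n + xs.length, t + xs.sum) := by
    intro xs
    induction xs with
    | nil => intro acc s n t; simp
    | cons x tl ihx =>
      intro acc s n t
      simp only [List.foldl_cons, ihx]
      simp
      refine ⟨by omega, by omega, by omega⟩
  simp [gen]

theorem foldA2 (queue2 : List Int) (s n : Int) :
    queue2.foldl (fun st j => (st.1 ++ [j], st.2.1 + j, st.2.2 + 1))
      (([], s, n) : List Int × Int × Int)
      = (queue2, s + queue2.sum, n + queue2.length) := by
  have gen : ∀ (xs : List Int) (acc : List Int) (s n : Int),
      xs.foldl (fun st j => (st.1 ++ [j], st.2.1 + j, st.2.2 + 1)) (acc, s, n)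
        = (acc ++ xs, s + xs.sum, n + xs.length) := by
    intro xs
    induction xs with
    | nil => intro acc s n; simp
    | cons x tl ihx =>
      intro acc s n
      simp only [List.foldl_cons, ihx]
      simp
      exact ⟨by omega, by omega⟩
  simpa using gen queue2 [] s n

-- ===== VERDICT (by name: the statement is the Claim_ definition above) =====
theorem solution_spec : Claim_equal_solution := by
  intro queue1 queue2 _ hpre
  unfold Spec_solution solution solution_alt
  simp only [foldA1, foldA2]
  have hPfold := foldP_scanl
    ((queue1 ++ queue2) ++ ((queue1 ++ queue2) ++ ((queue1 ++ queue2)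
      ++ ((queue1 ++ queue2) ++ (queue1 ++ queue2))))) [] 0
  simp only [List.nil_append] at hPfold
  rw [hPfold]
  have hlen5 : ((queue1 ++ queue2) ++ ((queue1 ++ queue2) ++ ((queue1 ++ queue2)
      ++ ((queue1 ++ queue2) ++ (queue1 ++ queue2))))).length
      = 5 * (queue1 ++ queue2).length := by
    simp [List.length_append]
    omega
  have hget := cycExt (queue1 ++ queue2) _ (cycExt (queue1 ++ queue2) _
    (cycExt (queue1 ++ queue2) _ (cycExt (queue1 ++ queue2) _ (cycBase (queue1 ++ queue2)))))
  have htake : ∀ m : Nat, m ≤ ((queue1 ++ queue2) ++ ((queue1 ++ queue2) ++ ((queue1 ++ queue2)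
      ++ ((queue1 ++ queue2) ++ (queue1 ++ queue2))))).length →
      ((queue1 ++ queue2) ++ ((queue1 ++ queue2) ++ ((queue1 ++ queue2)
        ++ ((queue1 ++ queue2) ++ (queue1 ++ queue2))))).take m
        = winMap (queue1 ++ queue2) 0 m := by
    intro m hm
    apply List.ext_getElem
    · rw [List.length_take, winMap_length]
      simp [List.length_append] at hm ⊢
      omega
    · intro j h1 h2
      rw [List.getElem_take, winMap_getElem _ _ _ _ h2]
      have hjlt : j < ((queue1 ++ queue2) ++ ((queue1 ++ queue2) ++ ((queue1 ++ queue2)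
          ++ ((queue1 ++ queue2) ++ (queue1 ++ queue2))))).length := by
        simp [winMap_length] at h2
        omega
      have hj := hget j hjlt
      rw [List.getElem?_eq_getElem hjlt] at hj
      have hj' := Option.some.inj hj
      rw [hj']
      norm_num
  have hread : ∀ i : Int, 0 ≤ i → i ≤ 5 * (((queue1 ++ queue2).length : Nat) : Int) →
      (PySem.List.pyGet? (List.scanl (· + ·) 0 ((queue1 ++ queue2) ++ ((queue1 ++ queue2)
        ++ ((queue1 ++ queue2) ++ ((queue1 ++ queue2) ++ (queue1 ++ queue2)))))) i).getD 0
      = (winMap (queue1 ++ queue2) 0 i.toNat).sum := by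
    intro i h0 h5
    have hle : i.toNat ≤ ((queue1 ++ queue2) ++ ((queue1 ++ queue2) ++ ((queue1 ++ queue2)
        ++ ((queue1 ++ queue2) ++ (queue1 ++ queue2))))).length := by omega
    rw [PySem.List.pyGet?_of_nonneg _ h0, scanl_getElem? _ 0 i.toNat hle, htake i.toNat hle]
    simp
  have hwfull : winMap (queue1 ++ queue2) 0 (queue1 ++ queue2).length = queue1 ++ queue2 := by
    simpa using winMap_prefix (queue1 ++ queue2) []
  have htotal : (PySem.List.pyGet? (List.scanl (· + ·) 0 ((queue1 ++ queue2) ++ ((queue1 ++ queue2)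
      ++ ((queue1 ++ queue2) ++ ((queue1 ++ queue2) ++ (queue1 ++ queue2))))))
      ((queue1.length : Int) + (queue2.length : Int))).getD 0 = queue1.sum + queue2.sum := by
    rw [hread ((queue1.length : Int) + (queue2.length : Int)) (by positivity) (by simp; omega)]
    rw [show ((queue1.length : Int) + (queue2.length : Int)).toNat = (queue1 ++ queue2).length
        by simp; omega]
    rw [hwfull]
    simp
  rw [htotal]
  set t := queue1.sum + queue2.sum with ht
  have hm : PySem.Int.mod t 2 = t % 2 := PySem.Int.mod_eq_emod_of_pos (by omega)
  rw [hm]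
  by_cases hodd : t % 2 = 1
  · simp [hodd]
  · have heven : t % 2 = 0 := by omega
    have hdvd : 2 ∣ t := by omega
    have htnn : 0 ≤ t := by
      rcases hpre with h | h
      · exact absurd hdvd h
      · exact h
    rw [if_neg hodd, if_neg (show ¬ t % 2 ≠ 0 by simp [heven])]
    set tgt := PySem.Int.floordiv t 2 with htgt
    have h2tgt : 2 * tgt = t := by
      rw [htgt, PySem.Int.floordiv_eq_ediv_of_pos (by omega)]
      omega
    have htgtnn : 0 ≤ tgt := by omega
    have hn : ((queue1.length : Int) + (queue2.length : Int))
        = (((queue1 ++ queue2).length : Nat) : Int) := by simp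
    rw [hn, show (((queue1 ++ queue2).length : Nat) : Int) * 4
        = 4 * (((queue1 ++ queue2).length : Nat) : Int) by ring]
    have hlapp : (queue1 ++ queue2).length = queue1.length + queue2.length := by simp
    have key := loop_eq (queue1 ++ queue2)
      (List.scanl (· + ·) 0 ((queue1 ++ queue2) ++ ((queue1 ++ queue2)
        ++ ((queue1 ++ queue2) ++ ((queue1 ++ queue2) ++ (queue1 ++ queue2))))))
      (queue1.length : Int) tgt (by omega) (by omega) htgtnn hread
      ((4 * (((queue1 ++ queue2).length : Nat) : Int) - 0).toNat) 0 0 queue1 queue2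
      rfl (by omega) (by omega) (by omega) (by omega) (by omega)
      (by rw [show (((queue1.length : Int) + 0 - 0) - 0).toNat = queue1.length by omega]
          exact (winMap_prefix queue1 queue2).symm)
      (by rw [show ((queue1.length : Int) + 0 - 0) = (queue1.length : Int) by ring,
              show ((0 + (((queue1 ++ queue2).length : Nat) : Int)) - (queue1.length : Int)).toNat
                = queue2.length by omega]
          exact (winMap_suffix queue1 queue2).symm)
      (by omega)
    exact key
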